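-- pv_equiv track=rewrite | github.com/ALTA-DE2-Zelva-Imam-Kusumonegoro-UBQgJ/Algo-DS-Part2 | problem4/main.py | count_item_and_sort
-- ===== SOURCE A (Python) =====
-- def count_item_and_sort(lst):
--     count = {}
--     for i in lst:
--         if i in count:
--             count[i] += 1
--         else:
--             count[i] = 1
--
--     sorted_items = sorted(count.items(), key=lambda x: (x[1], x[0]))
--
--     output = " ".join([f"{i[0]}->{i[1]}" for i in sorted_items])
--
--     return output
-- ===== SOURCE B (Python) =====
-- def count_item_and_sort(lst):
--     # sort-then-scan: count runs of the sorted copy, then re-sort pairs by (count, key)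
--     s = sorted(lst)
--     pairs = []
--     if s:
--         cur, n = s[0], 1
--         for x in s[1:]:
--             if x == cur:
--                 n += 1
--             else:
--                 pairs.append((cur, n))
--                 cur, n = x, 1
--         pairs.append((cur, n))
--     pairs.sort(key=lambda p: (p[1], p[0]))
--     return " ".join(f"{k}->{c}" for k, c in pairs)
-- ===== Notes on version B (the rewrite author's own statement) =====
-- stated objective: alternative
-- what changed: Replaces the dict-based counting pass by sort-then-run-scan: sort the list, count consecutive runs of equal keys, then re-sort the (key, count) pairs by (count, key) and format identically.
import Mathlib
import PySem

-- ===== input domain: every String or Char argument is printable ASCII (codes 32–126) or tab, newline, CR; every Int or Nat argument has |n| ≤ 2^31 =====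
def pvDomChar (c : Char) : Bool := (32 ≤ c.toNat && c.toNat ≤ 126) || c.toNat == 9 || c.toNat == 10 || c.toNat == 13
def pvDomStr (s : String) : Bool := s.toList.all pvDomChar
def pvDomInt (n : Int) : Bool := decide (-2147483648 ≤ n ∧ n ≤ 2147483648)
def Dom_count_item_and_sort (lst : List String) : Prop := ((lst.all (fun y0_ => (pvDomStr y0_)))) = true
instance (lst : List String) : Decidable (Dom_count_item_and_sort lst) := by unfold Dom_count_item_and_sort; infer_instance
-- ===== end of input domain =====

-- B replaces the hash-counting dict by sort-then-run-scan (alternative decomposition, same result).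

-- ===== PORT A =====
def count_item_and_sort (lst : List String) : String :=
  let count := lst.foldl (fun d i =>
    if d.contains i then d.insert i (d.getD i 0 + 1) else d.insert i 1) PySem.Dict.empty
  let sorted_items := PySem.List.sorted2 count.items (fun x => x.2) (fun x => x.1)
  PySem.Str.join " " (sorted_items.map (fun i => i.1 ++ "->" ++ PySem.Int.toStr i.2))

-- ===== PORT B =====
-- run scanner over the tail of the sorted list, carrying the current key and its count
def pvRunsAux : List String → String → Int → List (String × Int)
  | [], cur, n => [(cur, n)]
  | x :: xs, cur, n => if x = cur then pvRunsAux xs cur (n + 1) else (cur, n) :: pvRunsAux xs x 1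

def pvRuns : List String → List (String × Int)
  | [] => []
  | x :: xs => pvRunsAux xs x 1

def count_item_and_sort_alt (lst : List String) : String :=
  let s := PySem.List.sorted lst (fun x => x)
  let pairs := pvRuns s
  let ordered := PySem.List.sorted2 pairs (fun p => p.2) (fun p => p.1)
  PySem.Str.join " " (ordered.map (fun p => p.1 ++ "->" ++ PySem.Int.toStr p.2))

-- ===== PRECONDITION & SPEC =====
def Spec_count_item_and_sort (lst : List String) (out : String) : Prop := out = count_item_and_sort_alt lst
instance (lst : List String) (out : String) : Decidable (Spec_count_item_and_sort lst out) := by unfold Spec_count_item_and_sort; infer_instance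

-- ===== CLAIM (what is proved, stated in full; the proofs are below) =====
def Claim_equal_count_item_and_sort : Prop := ∀ (lst : List String), Dom_count_item_and_sort lst → Spec_count_item_and_sort lst (count_item_and_sort lst)

-- ===== LEMMAS AND PROOFS =====

-- sorted2 with keys (p.2, p.1) is sorted with the lexicographic key
lemma sorted2_eq_sorted_lex (xs : List (String × Int)) :
    PySem.List.sorted2 xs (fun p => p.2) (fun p => p.1)
      = PySem.List.sorted xs (fun p => toLex (p.2, p.1)) := by
  simp only [PySem.List.sorted2, PySem.List.sorted]
  congr 1
  funext acc x
  congr 1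
  funext a b
  simp only [Bool.false_eq_true, if_false]
  rw [Bool.eq_iff_iff]
  simp only [Bool.or_eq_true, Bool.and_eq_true, Bool.not_eq_true', decide_eq_true_eq,
    decide_eq_false_iff_not]
  rw [Prod.Lex.lt_iff]
  rcases lt_trichotomy a.2 b.2 with h | h | h
  · simp [h]
  · simp [h]
  · simp [h, not_lt_of_gt h, h.ne']

lemma keyLex_injective : Function.Injective (fun p : String × Int => toLex (p.2, p.1)) := by
  intro ⟨a, b⟩ ⟨c, d⟩ h
  have := toLex.injective h
  simp_all [Prod.ext_iff]

-- A's counting loop is Counter(lst)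
lemma foldA_eq_counter (lst : List String) :
    lst.foldl (fun d i => if d.contains i then d.insert i (d.getD i 0 + 1) else d.insert i 1)
      PySem.Dict.empty = PySem.Dict.counter lst := by
  rw [← PySem.Dict.foldl_insert_getD_add_one_eq_counter]
  congr 1
  funext d i
  by_cases h : d.contains i
  · simp [h]
  · have hnone : d.get? i = none := by
      have := PySem.Dict.contains_eq_isSome_get? d i
      rw [this] at h
      exact Option.not_isSome_iff_eq_none.mp h
    simp [h, PySem.Dict.getD, hnone]

-- the run scanner eats the leading run, then restarts
lemma pvRunsAux_eq (xs : List String) (cur : String) (n : Int) :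
    pvRunsAux xs cur n
      = (cur, n + ((xs.takeWhile (fun y => y == cur)).length : Int))
          :: pvRuns (xs.dropWhile (fun y => y == cur)) := by
  induction xs generalizing n with
  | nil => simp [pvRunsAux, pvRuns]
  | cons x xs ih =>
    by_cases h : x = cur
    · subst h
      simp only [pvRunsAux, List.takeWhile, List.dropWhile, BEq.rfl, if_true, ih,
        List.length_cons]
      congr 2
      push_cast
      ring
    · have hb : (x == cur) = false := by simp [h]
      simp [pvRunsAux, h, List.takeWhile, List.dropWhile, hb, pvRuns]

lemma gt_of_mem_dropWhile (x : String) (xs : List String)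
    (hx : ∀ y ∈ xs, x ≤ y) (hp : xs.Pairwise (· ≤ ·)) :
    ∀ y ∈ xs.dropWhile (fun y => y == x), y ≠ x := by
  induction xs with
  | nil => simp [List.dropWhile]
  | cons z zs ih =>
    intro y hy
    by_cases h : z = x
    · subst h
      simp only [List.dropWhile, BEq.rfl] at hy
      exact ih (fun w hw => hx w (List.mem_cons_of_mem _ hw)) hp.tail y hy
    · have hb : (z == x) = false := by simp [h]
      simp only [List.dropWhile, hb] at hy
      rcases List.mem_cons.mp hy with rfl | hy'
      · exact h
      · have hzx : x < z := lt_of_le_of_ne (hx z (List.mem_cons_self)) (Ne.symm h)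
        have hzy : z ≤ y := (List.pairwise_cons.mp hp).1 y hy'
        exact ne_of_gt (lt_of_lt_of_le hzx hzy)

-- on a sorted list, the runs are a permutation of the (distinct key, count) pairs
lemma pvRuns_perm (s : List String) (hs : s.Pairwise (· ≤ ·)) :
    (pvRuns s).Perm ((PySem.Set.ofList s).map (fun k => (k, (s.count k : Int)))) := by
  induction hn : s.length using Nat.strong_induction_on generalizing s with
  | _ m ih =>
    match s, hs with
    | [], _ => simp [pvRuns, PySem.Set.ofList]
    | x :: xs, hs =>
      have hx : ∀ y ∈ xs, x ≤ y := (List.pairwise_cons.mp hs).1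
      have hxs : xs.Pairwise (· ≤ ·) := (List.pairwise_cons.mp hs).2
      set tw := xs.takeWhile (fun y => y == x) with htw
      set dw := xs.dropWhile (fun y => y == x) with hdw
      have hsplit : tw ++ dw = xs := List.takeWhile_append_dropWhile
      have htwx : ∀ y ∈ tw, y = x := fun y hy => by
        simpa using List.mem_takeWhile_imp hy
      have hdwx : ∀ y ∈ dw, y ≠ x := gt_of_mem_dropWhile x xs hx hxs
      have hdws : dw.Pairwise (· ≤ ·) := hxs.sublist (List.dropWhile_sublist _)
      -- counts
      have hcx : (x :: xs).count x = 1 + tw.length := by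
        have h1 : tw.count x = tw.length := List.count_eq_length.mpr (fun b hb => (htwx b hb).symm)
        have h2 : dw.count x = 0 := List.count_eq_zero.mpr (fun hmem => hdwx x hmem rfl)
        rw [List.count_cons_self, ← hsplit, List.count_append, h1, h2]
        omega
      have hck : ∀ k ∈ dw, (x :: xs).count k = dw.count k := by
        intro k hk
        have hkx : k ≠ x := hdwx k hk
        have h1 : tw.count k = 0 := List.count_eq_zero.mpr (fun hmem => hkx (htwx k hmem))
        have hstep : (x :: xs).count k = xs.count k := by
          simp [Ne.symm hkx]
        rw [hstep, ← hsplit, List.count_append, h1]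
        omega
      -- key sets
      have hkeys : (PySem.Set.ofList (x :: xs)).Perm (x :: PySem.Set.ofList dw) := by
        rw [List.perm_ext_iff_of_nodup (PySem.Set.nodup_ofList _)
          (List.nodup_cons.mpr ⟨fun hmem => hdwx x ((PySem.Set.mem_ofList _ _).mp hmem) rfl,
            PySem.Set.nodup_ofList _⟩)]
        intro a
        simp only [PySem.Set.mem_ofList, List.mem_cons]
        constructor
        · rintro (rfl | ha)
          · exact Or.inl rfl
          · rw [← hsplit] at ha
            rcases List.mem_append.mp ha with h | h
            · exact Or.inl (htwx a h)
            · exact Or.inr h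
        · rintro (rfl | ha)
          · exact Or.inl rfl
          · refine Or.inr ?_
            rw [← hsplit]
            exact List.mem_append.mpr (Or.inr ha)
      -- unfold one step of pvRuns
      have hstep : pvRuns (x :: xs)
          = (x, ((x :: xs).count x : Int)) :: pvRuns dw := by
        rw [show pvRuns (x :: xs) = pvRunsAux xs x 1 from rfl, pvRunsAux_eq, ← htw, ← hdw, hcx]
        push_cast
        ring_nf
      have hlen : dw.length < m := by
        have h1 := List.Sublist.length_le (List.dropWhile_sublist (l := xs) (fun y => y == x))
        rw [← hdw] at h1
        have hn' : xs.length + 1 = m := by simpa using hn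
        omega
      have hih := ih dw.length hlen dw hdws rfl
      have hmapeq : (x, ((x :: xs).count x : Int)) ::
            (PySem.Set.ofList dw).map (fun k => (k, (dw.count k : Int)))
          = (x :: PySem.Set.ofList dw).map (fun k => (k, ((x :: xs).count k : Int))) := by
        simp only [List.map_cons, List.cons.injEq, true_and]
        refine (List.map_congr_left ?_).symm
        intro a ha
        rw [hck a ((PySem.Set.mem_ofList _ _).mp ha)]
      have h2 : ((x, ((x :: xs).count x : Int)) ::
            (PySem.Set.ofList dw).map (fun k => (k, (dw.count k : Int)))).Perm
          ((PySem.Set.ofList (x :: xs)).map (fun k => (k, ((x :: xs).count k : Int)))) := by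
        rw [hmapeq]
        exact (hkeys.map _).symm
      rw [hstep]
      exact (List.Perm.cons _ hih).trans h2

-- the two sorted pair lists coincide
lemma sorted_pairs_eq (lst : List String) :
    PySem.List.sorted2 (PySem.Dict.counter lst).items (fun x => x.2) (fun x => x.1)
      = PySem.List.sorted2 (pvRuns (PySem.List.sorted lst (fun x => x)))
          (fun p => p.2) (fun p => p.1) := by
  rw [sorted2_eq_sorted_lex, sorted2_eq_sorted_lex]
  apply PySem.List.sorted_eq_sorted_of_perm _ _ _ keyLex_injective
  set s := PySem.List.sorted lst (fun x => x) with hsdef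
  have hperm : s.Perm lst := PySem.List.sorted_perm lst (fun x => x) false
  have hs : s.Pairwise (· ≤ ·) := PySem.List.sorted_pairwise lst (fun x => x)
  have h1 := pvRuns_perm s hs
  have hkeys : (PySem.Set.ofList s).Perm (PySem.Set.ofList lst) := by
    rw [List.perm_ext_iff_of_nodup (PySem.Set.nodup_ofList _) (PySem.Set.nodup_ofList _)]
    intro a
    simp [PySem.Set.mem_ofList, hperm.mem_iff]
  have h2 : ((PySem.Set.ofList s).map (fun k => (k, (s.count k : Int)))).Perm
      ((PySem.Set.ofList lst).map (fun k => (k, (lst.count k : Int)))) := by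
    have hf : (fun k : String => (k, (s.count k : Int)))
        = (fun k : String => (k, (lst.count k : Int))) := by
      funext k; rw [hperm.count_eq]
    rw [hf]
    exact hkeys.map _
  rw [PySem.Dict.items_counter]
  exact ((h1.trans h2).symm)

-- ===== VERDICT (by name: the statement is the Claim_ definition above) =====
theorem count_item_and_sort_spec : Claim_equal_count_item_and_sort := by
  intro lst _
  unfold Spec_count_item_and_sort count_item_and_sort count_item_and_sort_alt
  simp only [foldA_eq_counter, sorted_pairs_eq]
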